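-- pv_equiv track=rewrite | github.com/pypi-data/pypi-mirror-402 | packages/ezpanos/ezpanos-0.2.1-py3-none-any.whl/ezpanos/ezpanos.py | build_xml_from_command
-- ===== SOURCE A (Python) =====
-- def build_xml_from_command(command_str: str) -> str:
--     """
--     Converts a space-separated command string into nested XML tags.
--     Handles special cases like variables (starting with $) which are treated as values.
--
--     Example:
--         "show system info"
--         -> "<show><system><info></info></system></show>"
--
--         "show devices deviceid $DEVICE_ID"
--         -> "<show><devices><deviceid>$DEVICE_ID</deviceid></devices></show>"
--
--     Args:
--         command_str (str): Command string.
--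
--     Returns:
--         str: XML API Command string.
--     """
--     parts = command_str.strip().split()
--     xml = ""
--     stack = []
--
--     i = 0
--     while i < len(parts):
--         part = parts[i]
--         # If next part is a variable, treat as value
--         if (i + 1 < len(parts)) and parts[i + 1].startswith("$"):
--             xml += f"<{part}>{parts[i + 1]}</{part}>"
--             i += 2
--         else:
--             xml += f"<{part}>"
--             stack.append(part)
--             i += 1
--
--     # Close all opened tags
--     while stack:
--         xml += f"</{stack.pop()}>"
--
--     return xml
-- ===== SOURCE B (Python) =====
-- def build_xml_from_command(command_str: str) -> str:
--     """Recursive-descent rewrite: builds each wrapped region by recursion instead of an explicit stack."""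
--     parts = command_str.strip().split()
--
--     def helper(i):
--         if i >= len(parts):
--             return ""
--         p = parts[i]
--         if i + 1 < len(parts) and parts[i + 1].startswith("$"):
--             return f"<{p}>{parts[i + 1]}</{p}>" + helper(i + 2)
--         return f"<{p}>" + helper(i + 1) + f"</{p}>"
--
--     return helper(0)
-- ===== Notes on version B (the rewrite author's own statement) =====
-- stated objective: alternative
-- what changed: Replaces the index-driven while-loop with an explicit stack and a final unwinding pass by a single recursive descent over the token list that wraps the recursive result in the open/close tags directly, so no stack is maintained.
import Mathlib
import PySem

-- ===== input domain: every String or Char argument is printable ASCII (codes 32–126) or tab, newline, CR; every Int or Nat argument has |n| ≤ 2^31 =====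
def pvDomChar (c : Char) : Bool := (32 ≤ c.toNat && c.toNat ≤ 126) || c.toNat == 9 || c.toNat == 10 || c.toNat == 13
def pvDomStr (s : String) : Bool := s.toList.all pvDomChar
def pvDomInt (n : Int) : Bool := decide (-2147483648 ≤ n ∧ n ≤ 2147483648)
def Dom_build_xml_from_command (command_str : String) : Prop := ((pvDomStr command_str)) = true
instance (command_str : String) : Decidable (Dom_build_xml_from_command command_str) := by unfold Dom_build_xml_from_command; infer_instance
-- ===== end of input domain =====

-- B replaces A's while-loop + explicit stack by a recursive descent over the token list (alternative decomposition; same cost).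

-- ===== PORT A =====
-- the trailing "while stack: xml += f'</{stack.pop()}>'" loop of A
def closeLoopA (stack : List String) (xml : String) : String :=
  stack.reverse.foldl (fun x t => x ++ "</" ++ t ++ ">") xml

-- A's main while-loop over index i, transcribed as recursion on the remaining parts,
-- carrying the same (stack, xml) state
def loopA : List String → List String → String → String
  | [], stack, xml => closeLoopA stack xml
  | [p], stack, xml => loopA [] (stack ++ [p]) (xml ++ "<" ++ p ++ ">")
  | p :: q :: rest, stack, xml =>
      if PySem.Str.startswith q "$" then
        loopA rest stack (xml ++ "<" ++ p ++ ">" ++ q ++ "</" ++ p ++ ">")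
      else
        loopA (q :: rest) (stack ++ [p]) (xml ++ "<" ++ p ++ ">")

def build_xml_from_command (command_str : String) : String :=
  loopA (PySem.Str.split₀ (PySem.Str.strip command_str)) [] ""

-- ===== PORT B =====
-- Source B's helper(i), transcribed as recursion on the remaining parts
def helperB : List String → String
  | [] => ""
  | [p] => "<" ++ p ++ ">" ++ "" ++ "</" ++ p ++ ">"
  | p :: q :: rest =>
      if PySem.Str.startswith q "$" then
        "<" ++ p ++ ">" ++ q ++ "</" ++ p ++ ">" ++ helperB rest
      else
        "<" ++ p ++ ">" ++ helperB (q :: rest) ++ "</" ++ p ++ ">"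

def build_xml_from_command_alt (command_str : String) : String :=
  helperB (PySem.Str.split₀ (PySem.Str.strip command_str))

-- ===== PRECONDITION & SPEC =====
def Spec_build_xml_from_command (command_str : String) (out : String) : Prop := out = build_xml_from_command_alt command_str
instance (command_str : String) (out : String) : Decidable (Spec_build_xml_from_command command_str out) := by unfold Spec_build_xml_from_command; infer_instance

-- ===== CLAIM (what is proved, stated in full; the proofs are below) =====
def Claim_equal_build_xml_from_command : Prop := ∀ (command_str : String), Dom_build_xml_from_command command_str → Spec_build_xml_from_command command_str (build_xml_from_command command_str)

-- ===== LEMMAS AND PROOFS =====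

theorem foldl_close (l : List String) (x : String) :
    l.foldl (fun a t => a ++ "</" ++ t ++ ">") x
      = x ++ l.foldl (fun a t => a ++ "</" ++ t ++ ">") "" := by
  induction l generalizing x with
  | nil => simp [List.foldl]
  | cons h t ih =>
    simp only [List.foldl]
    rw [ih, ih ("" ++ "</" ++ h ++ ">")]
    simp [String.append_assoc]

theorem closeLoopA_eq (stack : List String) (xml : String) :
    closeLoopA stack xml = xml ++ closeLoopA stack "" := by
  unfold closeLoopA; exact foldl_close _ _

theorem closeLoopA_snoc (stack : List String) (p : String) :
    closeLoopA (stack ++ [p]) "" = "</" ++ p ++ ">" ++ closeLoopA stack "" := by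
  unfold closeLoopA
  simp only [List.reverse_append, List.reverse_cons, List.reverse_nil, List.nil_append,
    List.cons_append, List.foldl]
  rw [foldl_close]
  simp [String.append_assoc]

theorem loopA_eq (parts stack : List String) (xml : String) :
    loopA parts stack xml = xml ++ helperB parts ++ closeLoopA stack "" := by
  induction parts, stack, xml using loopA.induct with
  | case1 stack xml =>
    simp [loopA, helperB, closeLoopA_eq stack xml]
  | case2 p stack xml ih =>
    simp only [loopA, helperB] at *
    rw [ih, closeLoopA_snoc]
    simp only [String.append_assoc, String.append_empty]
  | case3 p q rest stack xml h ih =>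
    simp only [loopA, helperB, h, if_true] at *
    rw [ih]
    simp [String.append_assoc]
  | case4 p q rest stack xml h ih =>
    simp only [loopA, helperB, h, if_neg, Bool.false_eq_true, not_false_iff] at *
    rw [ih, closeLoopA_snoc]
    simp only [String.append_assoc]

-- ===== VERDICT (by name: the statement is the Claim_ definition above) =====
theorem build_xml_from_command_spec : Claim_equal_build_xml_from_command := by
  intro s _
  show _ = _
  unfold build_xml_from_command build_xml_from_command_alt
  rw [loopA_eq]
  simp [closeLoopA]
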